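-- pv_equiv track=rewrite | github.com/OwenPawl/ghidra-re-skill | scripts/ghidra_swift_surface_backend.py | associated_conformance_label
-- ===== SOURCE A (Python) =====
-- from typing import Any, Dict, List, Optional, Set
--
-- def normalize(value: str) -> str:
--     return "".join(ch for ch in value.lower() if ch.isalnum())
--
-- def associated_conformance_label(entry: Dict[str, Any]) -> str:
--     leading = entry.get("conforming_type", "") or entry.get("type_name", "")
--     middle = entry.get("associated_type", "") or entry.get("protocol_name", "")
--     trailing = entry.get("concrete_type", "")
--     if middle and normalize(middle) == normalize(leading):
--         middle = ""
--     if trailing and normalize(trailing) == normalize(middle or leading):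
--         trailing = ""
--     parts = [part for part in [leading, middle, trailing] if part]
--     return " -> ".join(parts)
-- ===== SOURCE B (Python) =====
-- def normalize(value: str) -> str:
--     return "".join(ch for ch in value.lower() if ch.isalnum())
--
-- def _tail(key, items):
--     # recursively keep truthy items whose normalization differs from the
--     # normalized key of the last kept (or leading) value
--     if not items:
--         return []
--     v, rest = items[0], items[1:]
--     if v and normalize(v) != key:
--         return [v] + _tail(normalize(v), rest)
--     return _tail(key, rest)
--
-- def associated_conformance_label(entry):
--     leading = entry.get("conforming_type", "") or entry.get("type_name", "")
--     middle = entry.get("associated_type", "") or entry.get("protocol_name", "")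
--     trailing = entry.get("concrete_type", "")
--     head = [leading] if leading else []
--     return " -> ".join(head + _tail(normalize(leading), [middle, trailing]))
-- ===== Notes on version B (the rewrite author's own statement) =====
-- stated objective: alternative
-- what changed: Replaces A's two hardcoded per-field suppression checks with a recursive dedup helper over the tail candidates that threads the normalized key of the last kept (or leading) value, prepending the leading field separately.
import Mathlib
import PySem

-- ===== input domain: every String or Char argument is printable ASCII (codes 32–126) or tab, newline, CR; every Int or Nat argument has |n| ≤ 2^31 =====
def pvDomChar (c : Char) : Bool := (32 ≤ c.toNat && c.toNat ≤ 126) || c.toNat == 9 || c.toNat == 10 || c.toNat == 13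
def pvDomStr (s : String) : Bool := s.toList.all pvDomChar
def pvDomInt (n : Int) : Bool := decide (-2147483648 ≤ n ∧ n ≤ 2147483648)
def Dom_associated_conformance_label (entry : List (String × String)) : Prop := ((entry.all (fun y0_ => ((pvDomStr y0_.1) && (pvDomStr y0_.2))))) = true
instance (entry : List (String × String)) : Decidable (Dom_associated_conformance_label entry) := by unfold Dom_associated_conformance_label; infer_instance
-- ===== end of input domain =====

-- B replaces A's two hardcoded suppression checks by a recursive dedup over the tail
-- candidates that threads the NORMALIZED key of the last kept value (alternative decomposition, same cost).

-- shared helper: Python 'normalize' ("".join(ch for ch in value.lower() if ch.isalnum()))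
def pyNormalize (s : String) : String :=
  String.ofList ((PySem.Str.lower s).toList.filter PySem.Chars.isalnum)

-- Python 'x or y' on strings
def pyOrStr (a b : String) : String := if a ≠ "" then a else b

-- ===== PORT A =====
def associated_conformance_label (entry : List (String × String)) : String :=
  let d := PySem.Dict.ofList entry
  let leading := pyOrStr (PySem.Dict.getD d "conforming_type" "") (PySem.Dict.getD d "type_name" "")
  let middle := pyOrStr (PySem.Dict.getD d "associated_type" "") (PySem.Dict.getD d "protocol_name" "")
  let trailing := PySem.Dict.getD d "concrete_type" ""
  let middle := if middle ≠ "" ∧ pyNormalize middle = pyNormalize leading then "" else middle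
  let trailing := if trailing ≠ "" ∧ pyNormalize trailing = pyNormalize (pyOrStr middle leading) then "" else trailing
  PySem.Str.join " -> " (([leading, middle, trailing]).filter (fun p => p ≠ ""))

-- ===== PORT B =====
-- recursive helper '_tail' from Source B
def aclTail (key : String) (items : List String) : List String :=
  match items with
  | [] => []
  | v :: rest =>
    if v ≠ "" ∧ pyNormalize v ≠ key then v :: aclTail (pyNormalize v) rest
    else aclTail key rest

def associated_conformance_label_alt (entry : List (String × String)) : String :=
  let d := PySem.Dict.ofList entry
  let leading := pyOrStr (PySem.Dict.getD d "conforming_type" "") (PySem.Dict.getD d "type_name" "")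
  let middle := pyOrStr (PySem.Dict.getD d "associated_type" "") (PySem.Dict.getD d "protocol_name" "")
  let trailing := PySem.Dict.getD d "concrete_type" ""
  let head := if leading ≠ "" then [leading] else []
  PySem.Str.join " -> " (head ++ aclTail (pyNormalize leading) [middle, trailing])

-- ===== PRECONDITION & SPEC =====
def Spec_associated_conformance_label (entry : List (String × String)) (out : String) : Prop := out = associated_conformance_label_alt entry
instance (entry : List (String × String)) (out : String) : Decidable (Spec_associated_conformance_label entry out) := by unfold Spec_associated_conformance_label; infer_instance

-- ===== CLAIM (what is proved, stated in full; the proofs are below) =====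
def Claim_equal_associated_conformance_label : Prop := ∀ (entry : List (String × String)), Dom_associated_conformance_label entry → Spec_associated_conformance_label entry (associated_conformance_label entry)

-- ===== LEMMAS AND PROOFS =====
lemma acl_core (l m t : String) :
    PySem.Str.join " -> " (([l,
        if m ≠ "" ∧ pyNormalize m = pyNormalize l then "" else m,
        if t ≠ "" ∧ pyNormalize t = pyNormalize (pyOrStr (if m ≠ "" ∧ pyNormalize m = pyNormalize l then "" else m) l) then "" else t]).filter (fun p => p ≠ ""))
    = PySem.Str.join " -> "
        ((if l ≠ "" then [l] else []) ++ aclTail (pyNormalize l) [m, t]) := by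
  by_cases hl : l = "" <;> by_cases hm : m = "" <;> by_cases ht : t = "" <;>
  by_cases h1 : pyNormalize m = pyNormalize l <;>
  by_cases h2 : pyNormalize t = pyNormalize l <;>
  by_cases h3 : pyNormalize t = pyNormalize m <;>
    simp_all [pyOrStr, aclTail, List.filter]

-- ===== VERDICT (by name: the statement is the Claim_ definition above) =====
theorem associated_conformance_label_spec : Claim_equal_associated_conformance_label := by
  intro entry _
  simp only [Spec_associated_conformance_label, associated_conformance_label, associated_conformance_label_alt]
  exact acl_core _ _ _
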